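-- pv_equiv track=rewrite | github.com/JuEeHa/oonbotti2 | botcmd.py | getargnums
-- ===== SOURCE A (Python) =====
-- ARG_STD = 0
--
-- ARG_OPT = 1
--
-- ARG_UNL = 2
--
-- def getargnums(argtypes):
-- 	min = 0
-- 	max = 0 # max = None if number of arguments is unlimited
--
-- 	for argtype in argtypes:
-- 		if argtype == ARG_STD:
-- 			min += 1
-- 			if max != None: # Don't try to increment if max is unlimited
-- 				max += 1
-- 		elif argtype == ARG_OPT:
-- 			if max != None: # Don't try to increment if max is unlimited
-- 				max += 1
-- 		elif argtype == ARG_UNL: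
-- 			max = None
--
-- 	return min, max
-- ===== SOURCE B (Python) =====
-- ARG_STD = 0
-- ARG_OPT = 1
-- ARG_UNL = 2
--
-- def getargnums(argtypes):
-- 	min = argtypes.count(ARG_STD)
-- 	max = None if ARG_UNL in argtypes else min + argtypes.count(ARG_OPT)
-- 	return min, max
-- ===== Notes on version B (the rewrite author's own statement) =====
-- stated objective: simpler
-- what changed: Replaced the branchy accumulating loop over (min, max) state with aggregate counts: min = count(ARG_STD), max = None iff ARG_UNL is present, else count(ARG_STD)+count(ARG_OPT).
import Mathlib
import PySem

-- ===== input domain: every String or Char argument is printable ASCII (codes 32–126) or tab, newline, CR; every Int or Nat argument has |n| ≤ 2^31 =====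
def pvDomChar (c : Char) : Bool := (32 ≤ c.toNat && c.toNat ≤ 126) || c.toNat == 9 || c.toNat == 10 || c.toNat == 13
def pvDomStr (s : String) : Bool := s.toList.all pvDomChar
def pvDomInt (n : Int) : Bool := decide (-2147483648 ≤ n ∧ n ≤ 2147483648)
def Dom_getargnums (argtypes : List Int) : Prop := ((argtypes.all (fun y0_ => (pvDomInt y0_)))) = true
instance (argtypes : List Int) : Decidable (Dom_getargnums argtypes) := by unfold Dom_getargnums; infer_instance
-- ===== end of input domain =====

-- B replaces A's single branchy accumulating loop with aggregate counts (membership test + two count scans); objective: simpler.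

-- ===== PORT A =====
-- one loop step over the state (min, max), branches in A's order
def getargnumsStep (st : Int × Option Int) (argtype : Int) : Int × Option Int :=
  if argtype == 0 then
    (st.1 + 1, match st.2 with | some m => some (m + 1) | none => none)
  else if argtype == 1 then
    (st.1, match st.2 with | some m => some (m + 1) | none => none)
  else if argtype == 2 then
    (st.1, none)
  else st

def getargnums (argtypes : List Int) : Int × Option Int :=
  argtypes.foldl getargnumsStep (0, some 0)

-- ===== PORT B =====
def getargnums_alt (argtypes : List Int) : Int × Option Int :=
  let min := PySem.List.count argtypes 0
  let max := if argtypes.contains 2 then none else some (min + PySem.List.count argtypes 1)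
  (min, max)

-- ===== PRECONDITION & SPEC =====
def Spec_getargnums (argtypes : List Int) (out : Int × Option Int) : Prop := out = getargnums_alt argtypes
instance (argtypes : List Int) (out : Int × Option Int) : Decidable (Spec_getargnums argtypes out) := by unfold Spec_getargnums; infer_instance

-- ===== CLAIM (what is proved, stated in full; the proofs are below) =====
def Claim_equal_getargnums : Prop := ∀ (argtypes : List Int), Dom_getargnums argtypes → Spec_getargnums argtypes (getargnums argtypes)

-- ===== LEMMAS AND PROOFS =====

theorem getargnums_foldl_inv (l : List Int) (m : Int) (x : Option Int) :
    l.foldl getargnumsStep (m, x) =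
      (m + PySem.List.count l 0,
       match x with
       | none => none
       | some v => if l.contains 2 then none else some (v + PySem.List.count l 0 + PySem.List.count l 1)) := by
  induction l generalizing m x with
  | nil => cases x <;> simp [PySem.List.count]
  | cons a t ih =>
    simp only [List.foldl_cons, getargnumsStep]
    by_cases h0 : a = 0
    · subst h0
      cases x <;> simp [ih, PySem.List.count]
      · omega
      · split_ifs <;> simp <;> omega
    · by_cases h1 : a = 1
      · subst h1
        cases x <;> simp [ih, PySem.List.count]
        split_ifs <;> simp; omega
      · by_cases h2 : a = 2
        · subst h2
          cases x <;> simp [ih, h0, PySem.List.count]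
        · have h2' : (2 : Int) ≠ a := fun h => h2 h.symm
          cases x <;> simp [ih, h0, h1, h2, h2', PySem.List.count]

-- ===== VERDICT (by name: the statement is the Claim_ definition above) =====
theorem getargnums_spec : Claim_equal_getargnums := by
  intro argtypes _
  unfold Spec_getargnums getargnums getargnums_alt
  rw [getargnums_foldl_inv]
  simp only [PySem.List.count, Int.zero_add]
  split_ifs <;> simp
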